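-- pv_equiv track=rewrite | github.com/GreenteaHT/Coding_Test | Programmers_Python/LV0/이차원_배열_대각선_순회하기.py | solution
-- ===== SOURCE A (Python) =====
-- def solution(board, k):
--     answer = 0
--     for i in range(min(k+1, len(board))):
--         for j in range(min(k+1, len(board[0]))):
--             if i + j <= k:
--                 answer += board[i][j]
--             else:
--                 break
--     return answer
-- ===== SOURCE B (Python) =====
-- def solution(board, k):
--     if not board:
--         return 0
--     n, m = len(board), len(board[0])
--     total = 0
--     for d in range(min(k, n + m - 2) + 1):
--         lo = max(0, d - (m - 1))
--         hi = min(d, n - 1)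
--         for i in range(lo, hi + 1):
--             total += board[i][d - i]
--     return total
-- ===== Notes on version B (the rewrite author's own statement) =====
-- stated objective: alternative
-- what changed: B traverses the board by anti-diagonals d = i+j (computing explicit per-diagonal index bounds) instead of A's row-by-row scan with an early break; same cells are summed in a different order.
import Mathlib
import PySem

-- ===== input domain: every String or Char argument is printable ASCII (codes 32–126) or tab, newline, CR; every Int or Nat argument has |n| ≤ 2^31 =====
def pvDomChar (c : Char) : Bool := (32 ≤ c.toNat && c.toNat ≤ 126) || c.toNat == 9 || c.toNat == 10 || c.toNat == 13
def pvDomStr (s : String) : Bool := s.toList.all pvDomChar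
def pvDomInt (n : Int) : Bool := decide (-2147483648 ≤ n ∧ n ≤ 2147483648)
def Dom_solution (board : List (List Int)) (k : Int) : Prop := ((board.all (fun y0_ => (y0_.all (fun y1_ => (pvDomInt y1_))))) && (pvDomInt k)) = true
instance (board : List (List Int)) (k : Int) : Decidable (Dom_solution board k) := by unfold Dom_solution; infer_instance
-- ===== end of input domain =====

-- B sums the same cells by anti-diagonals d = i+j instead of A's row scan with break; equivalence is a reordering of a finite sum (alternative decomposition, no speed claim).

-- ===== PORT A =====
-- A's inner loop with `break` is modeled by a recursion over the j-range that stops at the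
-- first j with i + j > k. Cell accesses are in range under Pre_; the port reads cells with
-- pyGetD (default never used inside Pre_).
def solInnerA (board : List (List Int)) (k i : Int) : List Int → Int → Int
  | [], acc => acc
  | j :: rest, acc =>
    if i + j ≤ k then
      solInnerA board k i rest (acc + PySem.List.pyGetD (PySem.List.pyGetD board i []) j 0)
    else acc

def solution (board : List (List Int)) (k : Int) : Int :=
  (PySem.List.pyRange 0 (min (k + 1) (board.length : Int)) 1).foldl
    (fun acc i =>
      solInnerA board k i
        (PySem.List.pyRange 0 (min (k + 1) ((PySem.List.pyGetD board 0 []).length : Int)) 1) acc) 0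

-- ===== PORT B =====
def solution_alt (board : List (List Int)) (k : Int) : Int :=
  if board.length = 0 then 0
  else
    let n : Int := board.length
    let m : Int := (PySem.List.pyGetD board 0 []).length
    (PySem.List.pyRange 0 (min k (n + m - 2) + 1) 1).foldl
      (fun total d =>
        (PySem.List.pyRange (max 0 (d - (m - 1))) (min d (n - 1) + 1) 1).foldl
          (fun t i => t + PySem.List.pyGetD (PySem.List.pyGetD board i []) (d - i) 0) total) 0

-- ===== PRECONDITION & SPEC =====
-- Pre_ excludes exactly the ragged boards on which A raises IndexError: a row i reached by the
-- outer loop that is shorter than the last column index the inner loop reads before breaking.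
def Pre_solution (board : List (List Int)) (k : Int) : Prop :=
  ∀ i : Nat, i < board.length → (i : Int) < k + 1 →
    min (min (k + 1) (((board.getD 0 []).length : Int))) (k - (i : Int) + 1)
      ≤ ((board.getD i []).length : Int)
instance (board : List (List Int)) (k : Int) : Decidable (Pre_solution board k) := by
  unfold Pre_solution; infer_instance

def pvWitness_solution : List (List Int) × Int := ([[1, 2], [3, 4]], 1)

def Spec_solution (board : List (List Int)) (k : Int) (out : Int) : Prop := out = solution_alt board k
instance (board : List (List Int)) (k : Int) (out : Int) : Decidable (Spec_solution board k out) := by unfold Spec_solution; infer_instance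

-- ===== CLAIM (what is proved, stated in full; the proofs are below) =====
def Claim_equal_solution : Prop := ∀ (board : List (List Int)) (k : Int), Dom_solution board k → Pre_solution board k → Spec_solution board k (solution board k)

-- ===== LEMMAS AND PROOFS =====

-- the (totalized) cell read both ports use
def cellG (board : List (List Int)) (i j : Int) : Int :=
  PySem.List.pyGetD (PySem.List.pyGetD board i []) j 0

theorem sum_Ico_cons (f : Int → Int) (a E : Int) (h : a < E) :
    ∑ j ∈ Finset.Ico a E, f j = f a + ∑ j ∈ Finset.Ico (a + 1) E, f j := by
  have h2 : Finset.Ico a E = insert a (Finset.Ico (a + 1) E) := by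
    ext x; simp only [Finset.mem_Ico, Finset.mem_insert]; omega
  rw [h2, Finset.sum_insert (by simp only [Finset.mem_Ico]; omega)]

theorem innerA_sum (board : List (List Int)) (k i b : Int) :
    ∀ (N : ℕ) (a acc : Int), (b - a).toNat ≤ N →
      solInnerA board k i (PySem.List.pyRange a b 1) acc
        = acc + ∑ j ∈ Finset.Ico a (min b (k - i + 1)), cellG board i j := by
  intro N
  induction N with
  | zero =>
    intro a acc h
    rw [PySem.List.pyRange_one_eq_nil (by omega), Finset.Ico_eq_empty (by simp; omega)]
    simp [solInnerA]
  | succ N ih =>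
    intro a acc h
    by_cases hab : a < b
    · rw [PySem.List.pyRange_one_cons hab]
      simp only [solInnerA]
      split_ifs with hk
      · rw [ih (a + 1) _ (by omega),
          sum_Ico_cons (fun j => cellG board i j) a (min b (k - i + 1)) (by omega)]
        unfold cellG
        ring
      · rw [Finset.Ico_eq_empty (by simp; omega)]
        simp
    · rw [PySem.List.pyRange_one_eq_nil (by omega), Finset.Ico_eq_empty (by simp; omega)]
      simp [solInnerA]

theorem foldl_eq_sum (body : Int → Int → Int) (F : Int → Int)
    (h : ∀ acc x, body acc x = acc + F x) :
    ∀ (l : List Int) (init : Int), l.foldl body init = init + (l.map F).sum := by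
  intro l
  induction l with
  | nil => simp
  | cons x xs ih =>
    intro init
    simp only [List.foldl_cons, List.map_cons, List.sum_cons, h, ih]
    ring

theorem sum_pyRange (f : Int → Int) (b : Int) :
    ∀ (N : ℕ) (a : Int), (b - a).toNat ≤ N →
      ((PySem.List.pyRange a b 1).map f).sum = ∑ j ∈ Finset.Ico a b, f j := by
  intro N
  induction N with
  | zero =>
    intro a h
    rw [PySem.List.pyRange_one_eq_nil (by omega), Finset.Ico_eq_empty (by simp; omega)]
    simp
  | succ N ih =>
    intro a h
    by_cases hab : a < b
    · rw [PySem.List.pyRange_one_cons hab]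
      simp only [List.map_cons, List.sum_cons, ih (a + 1) (by omega)]
      rw [sum_Ico_cons f a b hab]
    · rw [PySem.List.pyRange_one_eq_nil (by omega), Finset.Ico_eq_empty (by simp; omega)]
      simp

-- The core reindexing identity: row-wise truncated sums = anti-diagonal sums.
theorem core_reindex (g : Int → Int → Int) (n m k : Int) :
    (∑ i ∈ Finset.Ico 0 (min (k + 1) n),
        ∑ j ∈ Finset.Ico 0 (min (min (k + 1) m) (k - i + 1)), g i j)
      = ∑ d ∈ Finset.Ico 0 (min k (n + m - 2) + 1),
          ∑ i ∈ Finset.Ico (max 0 (d - (m - 1))) (min d (n - 1) + 1), g i (d - i) := by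
  have lhs_eq :
      (∑ i ∈ Finset.Ico 0 (min (k + 1) n),
          ∑ j ∈ Finset.Ico 0 (min (min (k + 1) m) (k - i + 1)), g i j)
        = ∑ p ∈ (Finset.Ico (0:Int) (min (k + 1) n) ×ˢ Finset.Ico (0:Int) (min (k + 1) m)).filter
              (fun p => p.1 + p.2 ≤ k), g p.1 p.2 := by
    rw [Finset.sum_filter, Finset.sum_product]
    apply Finset.sum_congr rfl
    intro i _
    rw [← Finset.sum_filter]
    apply Finset.sum_congr _ (fun _ _ => rfl)
    ext j
    simp only [Finset.mem_Ico, Finset.mem_filter]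
    omega
  have rhs_eq :
      (∑ d ∈ Finset.Ico 0 (min k (n + m - 2) + 1),
          ∑ i ∈ Finset.Ico (max 0 (d - (m - 1))) (min d (n - 1) + 1), g i (d - i))
        = ∑ p ∈ (Finset.Ico (0:Int) (min k (n + m - 2) + 1) ×ˢ Finset.Ico (0:Int) n).filter
              (fun p => p.2 ≤ p.1 ∧ p.1 - p.2 < m), g p.2 (p.1 - p.2) := by
    rw [Finset.sum_filter, Finset.sum_product]
    apply Finset.sum_congr rfl
    intro d _
    rw [← Finset.sum_filter]
    apply Finset.sum_congr _ (fun _ _ => rfl)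
    ext i
    simp only [Finset.mem_Ico, Finset.mem_filter]
    omega
  rw [lhs_eq, rhs_eq]
  apply Finset.sum_nbij' (fun p => (p.1 + p.2, p.1)) (fun p => (p.2, p.1 - p.2))
  · intro p hp
    simp only [Finset.mem_filter, Finset.mem_product, Finset.mem_Ico] at hp ⊢
    omega
  · intro p hp
    simp only [Finset.mem_filter, Finset.mem_product, Finset.mem_Ico] at hp ⊢
    omega
  · intro p _
    have h1 : p.1 + p.2 - p.1 = p.2 := by omega
    rw [h1]
  · intro p _
    have h1 : p.2 + (p.1 - p.2) = p.1 := by omega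
    rw [h1]
  · intro p _
    simp only []
    congr 1
    omega

-- ===== VERDICT (by name: the statement is the Claim_ definition above) =====
theorem solution_spec : Claim_equal_solution := by
  intro board k _ _
  unfold Spec_solution
  by_cases hb : board.length = 0
  · have hbn : board = [] := List.length_eq_zero_iff.mp hb
    subst hbn
    unfold solution solution_alt
    rw [PySem.List.pyRange_one_eq_nil (by simp)]
    simp
  · have hA : solution board k
        = ∑ i ∈ Finset.Ico 0 (min (k + 1) (board.length : Int)),
            ∑ j ∈ Finset.Ico 0
                (min (min (k + 1) ((PySem.List.pyGetD board 0 []).length : Int)) (k - i + 1)),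
              cellG board i j := by
      unfold solution
      rw [foldl_eq_sum _
            (fun i => ∑ j ∈ Finset.Ico 0
                (min (min (k + 1) ((PySem.List.pyGetD board 0 []).length : Int)) (k - i + 1)),
              cellG board i j)
            (fun acc i => innerA_sum board k i _
              ((min (k + 1) ((PySem.List.pyGetD board 0 []).length : Int)) - 0).toNat 0 acc
              (by omega)),
          sum_pyRange _ _ ((min (k + 1) (board.length : Int)) - 0).toNat 0 (by omega)]
      simp
    have hB : solution_alt board k
        = ∑ d ∈ Finset.Ico 0
              (min k ((board.length : Int) + ((PySem.List.pyGetD board 0 []).length : Int) - 2) + 1),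
            ∑ i ∈ Finset.Ico
                (max 0 (d - (((PySem.List.pyGetD board 0 []).length : Int) - 1)))
                (min d ((board.length : Int) - 1) + 1),
              cellG board i (d - i) := by
      unfold solution_alt
      rw [if_neg hb]
      have hInner : ∀ (total d : Int),
          (PySem.List.pyRange
              (max 0 (d - (((PySem.List.pyGetD board 0 []).length : Int) - 1)))
              (min d ((board.length : Int) - 1) + 1) 1).foldl
            (fun t i => t + PySem.List.pyGetD (PySem.List.pyGetD board i []) (d - i) 0) total
          = total + ∑ i ∈ Finset.Ico
                (max 0 (d - (((PySem.List.pyGetD board 0 []).length : Int) - 1)))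
                (min d ((board.length : Int) - 1) + 1),
              cellG board i (d - i) := by
        intro total d
        exact (foldl_eq_sum (fun t i => t + cellG board i (d - i))
            (fun i => cellG board i (d - i)) (fun _ _ => rfl) _ total).trans
          (by rw [sum_pyRange (fun i => cellG board i (d - i)) _
              ((min d ((board.length : Int) - 1) + 1
                - max 0 (d - (((PySem.List.pyGetD board 0 []).length : Int) - 1))).toNat)
              _ (by omega)])
      rw [foldl_eq_sum _
            (fun d => ∑ i ∈ Finset.Ico
                (max 0 (d - (((PySem.List.pyGetD board 0 []).length : Int) - 1)))
                (min d ((board.length : Int) - 1) + 1),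
              cellG board i (d - i))
            hInner,
          sum_pyRange _ _ ((min k ((board.length : Int) + ((PySem.List.pyGetD board 0 []).length : Int) - 2) + 1) - 0).toNat 0 (by omega)]
      simp
    rw [hA, hB]
    exact core_reindex (cellG board) (board.length : Int)
      ((PySem.List.pyGetD board 0 []).length : Int) k
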